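-- pv_equiv track=rewrite | github.com/kevinnbass/TestMaster | testmaster/streaming/incremental_enhancer.py | _optimize_test
-- ===== SOURCE A (Python) =====
-- def _optimize_test(content: str) -> str:
--     """Optimize test performance and structure."""
--     # Remove duplicate imports
--     lines = content.split('\n')
--     imports = set()
--     optimized_lines = []
--
--     for line in lines:
--         if line.startswith('import ') or line.startswith('from '):
--             if line not in imports:
--                 imports.add(line)
--                 optimized_lines.append(line)
--         else:
--             optimized_lines.append(line)
--
--     # Remove excessive empty lines
--     final_lines = []
--     empty_count = 0
--
--     for line in optimized_lines:
--         if line.strip() == '':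
--             empty_count += 1
--             if empty_count <= 2:  # Max 2 consecutive empty lines
--                 final_lines.append(line)
--         else:
--             empty_count = 0
--             final_lines.append(line)
--
--     return '\n'.join(final_lines)
-- ===== SOURCE B (Python) =====
-- def _optimize_test(content: str) -> str:
--     """Optimize test performance and structure (single fused pass)."""
--     imports = set()
--     empty_count = 0
--     out = []
--     for line in content.split('\n'):
--         is_import = line.startswith('import ') or line.startswith('from ')
--         if is_import and line in imports:
--             continue
--         if line.strip() == '':
--             empty_count += 1
--             if empty_count <= 2:
--                 out.append(line)
--         else:
--             empty_count = 0
--             if is_import: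
--                 imports.add(line)
--             out.append(line)
--     return '\n'.join(out)
-- ===== Notes on version B (the rewrite author's own statement) =====
-- stated objective: simpler
-- what changed: Fuses A's two sequential passes (import dedup, then empty-line collapse) into one loop that maintains the imports set and the consecutive-empty counter together, appending to a single output list.
import Mathlib
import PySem

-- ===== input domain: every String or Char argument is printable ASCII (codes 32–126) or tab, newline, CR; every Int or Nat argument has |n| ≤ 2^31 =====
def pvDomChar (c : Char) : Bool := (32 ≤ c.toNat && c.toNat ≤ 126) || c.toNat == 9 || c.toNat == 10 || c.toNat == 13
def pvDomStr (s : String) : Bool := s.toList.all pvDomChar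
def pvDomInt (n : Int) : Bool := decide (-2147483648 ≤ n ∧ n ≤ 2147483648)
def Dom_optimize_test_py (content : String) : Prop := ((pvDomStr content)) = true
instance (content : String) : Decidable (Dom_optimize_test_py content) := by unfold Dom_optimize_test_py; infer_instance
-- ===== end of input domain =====

-- B fuses A's two passes (import dedup, then empty-line collapse) into one loop; objective: simpler.
-- Strings are handled as lists of code points (List Char) via PySem.Chars, which is exact for these operations.

-- ===== PORT A =====
-- first loop of A: dedup import/from lines (state: imports set, optimized_lines)
def pvAStep1 (st : PySem.Set (List Char) × List (List Char)) (line : List Char) :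
    PySem.Set (List Char) × List (List Char) :=
  if PySem.Chars.startswith line "import ".toList || PySem.Chars.startswith line "from ".toList then
    if !(PySem.Set.contains st.1 line) then (PySem.Set.add st.1 line, st.2 ++ [line])
    else st
  else (st.1, st.2 ++ [line])

-- second loop of A: cap consecutive empty lines at 2 (state: final_lines, empty_count)
def pvAStep2 (st : List (List Char) × Nat) (line : List Char) : List (List Char) × Nat :=
  if PySem.Chars.strip line == [] then
    (if st.2 + 1 ≤ 2 then st.1 ++ [line] else st.1, st.2 + 1)
  else (st.1 ++ [line], 0)

def optimize_test_py (content : String) : String :=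
  let lines := PySem.Chars.splitOn content.toList "\n".toList
  let dedup := lines.foldl pvAStep1 (PySem.Set.empty, [])
  let fin := dedup.2.foldl pvAStep2 ([], 0)
  String.ofList (PySem.Chars.join "\n".toList fin.1)

-- ===== PORT B =====
def pvBIsImp (line : List Char) : Bool :=
  PySem.Chars.startswith line "import ".toList || PySem.Chars.startswith line "from ".toList

-- the single fused loop of B (state: imports set, empty_count, out)
def pvBStep (st : PySem.Set (List Char) × Nat × List (List Char)) (line : List Char) :
    PySem.Set (List Char) × Nat × List (List Char) :=
  if pvBIsImp line && PySem.Set.contains st.1 line then st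
  else if PySem.Chars.strip line == [] then
    (st.1, st.2.1 + 1, if st.2.1 + 1 ≤ 2 then st.2.2 ++ [line] else st.2.2)
  else ((if pvBIsImp line then PySem.Set.add st.1 line else st.1), 0, st.2.2 ++ [line])

def optimize_test_py_alt (content : String) : String :=
  let r := (PySem.Chars.splitOn content.toList "\n".toList).foldl pvBStep (PySem.Set.empty, 0, [])
  String.ofList (PySem.Chars.join "\n".toList r.2.2)

-- ===== PRECONDITION & SPEC =====
def Spec_optimize_test_py (content : String) (out : String) : Prop := out = optimize_test_py_alt content
instance (content : String) (out : String) : Decidable (Spec_optimize_test_py content out) := by unfold Spec_optimize_test_py; infer_instance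

-- ===== CLAIM (what is proved, stated in full; the proofs are below) =====
def Claim_equal_optimize_test_py : Prop := ∀ (content : String), Dom_optimize_test_py content → Spec_optimize_test_py content (optimize_test_py content)

-- ===== LEMMAS AND PROOFS =====

-- emitted lines of A's first loop, as a recursion (for the proof only)
def pvEm1 : List (List Char) → PySem.Set (List Char) → List (List Char)
  | [], _ => []
  | l :: ls, s =>
    if pvBIsImp l then
      if PySem.Set.contains s l then pvEm1 ls s
      else l :: pvEm1 ls (PySem.Set.add s l)
    else l :: pvEm1 ls s

-- emitted lines of A's second loop
def pvEm2 : List (List Char) → Nat → List (List Char)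
  | [], _ => []
  | l :: ls, n =>
    if PySem.Chars.strip l == [] then
      (if n + 1 ≤ 2 then [l] else []) ++ pvEm2 ls (n + 1)
    else l :: pvEm2 ls 0

-- emitted lines of B's fused loop
def pvEm3 : List (List Char) → PySem.Set (List Char) → Nat → List (List Char)
  | [], _, _ => []
  | l :: ls, s, n =>
    if pvBIsImp l && PySem.Set.contains s l then pvEm3 ls s n
    else if PySem.Chars.strip l == [] then
      (if n + 1 ≤ 2 then [l] else []) ++ pvEm3 ls s (n + 1)
    else l :: pvEm3 ls (if pvBIsImp l then PySem.Set.add s l else s) 0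

theorem pvFoldl1 (ls : List (List Char)) : ∀ s acc,
    (ls.foldl pvAStep1 (s, acc)).2 = acc ++ pvEm1 ls s := by
  induction ls with
  | nil => intro s acc; simp [pvEm1]
  | cons l ls ih =>
    intro s acc
    simp only [List.foldl_cons, pvAStep1, pvEm1, pvBIsImp]
    split_ifs <;> simp_all

theorem pvFoldl2 (ls : List (List Char)) : ∀ n acc,
    (ls.foldl pvAStep2 (acc, n)).1 = acc ++ pvEm2 ls n := by
  induction ls with
  | nil => intro n acc; simp [pvEm2]
  | cons l ls ih =>
    intro n acc
    simp only [List.foldl_cons, pvAStep2, pvEm2]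
    split_ifs <;> simp_all

theorem pvFoldl3 (ls : List (List Char)) : ∀ s n acc,
    (ls.foldl pvBStep (s, n, acc)).2.2 = acc ++ pvEm3 ls s n := by
  induction ls with
  | nil => intro s n acc; simp [pvEm3]
  | cons l ls ih =>
    intro s n acc
    simp only [List.foldl_cons, pvBStep, pvEm3, pvBIsImp]
    split_ifs <;> simp_all

-- a line whose first character is not whitespace does not strip to empty
theorem pvStripConsNeNil (c : Char) (hc : PySem.Chars.isspace c = false) (xs : List Char) :
    PySem.Chars.strip (c :: xs) ≠ [] := by
  simp only [PySem.Chars.strip, PySem.Chars.lstrip, PySem.Chars.rstrip,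
    List.dropWhile_cons, hc]
  simp only [Bool.false_eq_true, if_false, ne_eq, List.reverse_eq_nil_iff,
    List.dropWhile_eq_nil_iff]
  intro h
  have := h c (by simp)
  simp [hc] at this

-- an import/from line never strips to empty
theorem pvImpNotBlank (l : List Char) (h : pvBIsImp l = true) :
    PySem.Chars.strip l ≠ [] := by
  simp only [pvBIsImp, Bool.or_eq_true, PySem.Chars.startswith,
    List.isPrefixOf_iff_prefix] at h
  rcases h with h | h <;> rcases h with ⟨t, ht⟩ <;> rw [← ht]
  · exact pvStripConsNeNil 'i' (by decide) _
  · exact pvStripConsNeNil 'f' (by decide) _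

-- fusion: B's single pass emits exactly A's second pass applied to A's first pass
theorem pvFuse (ls : List (List Char)) : ∀ s n,
    pvEm3 ls s n = pvEm2 (pvEm1 ls s) n := by
  induction ls with
  | nil => intro s n; simp [pvEm1, pvEm2, pvEm3]
  | cons l ls ih =>
    intro s n
    simp only [pvEm1, pvEm3]
    split_ifs <;> simp_all [pvEm2, pvImpNotBlank]

-- ===== VERDICT (by name: the statement is the Claim_ definition above) =====
theorem optimize_test_py_spec : Claim_equal_optimize_test_py := by
  intro content _
  unfold Spec_optimize_test_py optimize_test_py optimize_test_py_alt
  simp only [pvFoldl1, pvFoldl2, pvFoldl3, pvFuse, List.nil_append]
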